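-- pv_equiv track=rewrite | github.com/shivangi93/DP_PROBLEMs_INTERVIEWBIT | ways_to_color_3xn_board.py | solve
-- ===== SOURCE A (Python) =====
-- def solve(A):
--     comb_using_3_color=24 #4C3
--     comb_using_2_color=12 #4C2
--
--     for i in range(2,A+1):
--         t=comb_using_3_color
--         comb_using_3_color=(11*comb_using_3_color+10*comb_using_2_color)%1000000007
--         comb_using_2_color=(5*t+7*comb_using_2_color)%1000000007
--     result=(comb_using_3_color+comb_using_2_color)%1000000007
--     return result
-- ===== SOURCE B (Python) =====
-- MOD = 1000000007
--
-- def _mul(X, Y):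
--     (a, b), (c, d) = X
--     (e, f), (g, h) = Y
--     return (((a * e + b * g) % MOD, (a * f + b * h) % MOD),
--             ((c * e + d * g) % MOD, (c * f + d * h) % MOD))
--
-- def _mpow(X, e):
--     if e == 0:
--         return ((1, 0), (0, 1))
--     H = _mpow(_mul(X, X), e // 2)
--     return _mul(X, H) if e % 2 == 1 else H
--
-- def solve(A):
--     e = A - 1 if A > 1 else 0
--     M = _mpow(((11, 10), (5, 7)), e)
--     c3 = (M[0][0] * 24 + M[0][1] * 12) % MOD
--     c2 = (M[1][0] * 24 + M[1][1] * 12) % MOD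
--     return (c3 + c2) % MOD
-- ===== Notes on version B (the rewrite author's own statement) =====
-- stated objective: faster
-- what changed: Replaced A's iteration of the linear recurrence A-1 times by binary exponentiation of the 2x2 recurrence matrix [[11,10],[5,7]] mod 1e9+7, applied to the initial vector (24,12).
import Mathlib
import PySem

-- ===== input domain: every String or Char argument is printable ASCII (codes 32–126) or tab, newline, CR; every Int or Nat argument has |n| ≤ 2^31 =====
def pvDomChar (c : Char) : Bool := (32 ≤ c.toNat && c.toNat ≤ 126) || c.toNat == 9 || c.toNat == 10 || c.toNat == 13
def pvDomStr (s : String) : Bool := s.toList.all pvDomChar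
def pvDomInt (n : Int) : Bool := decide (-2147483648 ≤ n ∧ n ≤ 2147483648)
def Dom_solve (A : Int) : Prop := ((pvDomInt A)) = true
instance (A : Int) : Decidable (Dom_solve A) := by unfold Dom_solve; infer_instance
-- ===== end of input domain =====

-- B replaces A's linear-time loop by binary matrix exponentiation of the 2x2 recurrence matrix mod 1e9+7 (asymptotically faster).


-- ===== PORT A =====
def solve (A : Int) : Int :=
  let f := (PySem.List.pyRange 2 (A + 1) 1).foldl
    (fun (s : Int × Int) (_ : Int) =>
      let t := s.1
      ((11 * s.1 + 10 * s.2) % 1000000007, (5 * t + 7 * s.2) % 1000000007))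
    (24, 12)
  (f.1 + f.2) % 1000000007

-- ===== PORT B =====
def pvMul (X Y : (Int × Int) × (Int × Int)) : (Int × Int) × (Int × Int) :=
  (((X.1.1 * Y.1.1 + X.1.2 * Y.2.1) % 1000000007, (X.1.1 * Y.1.2 + X.1.2 * Y.2.2) % 1000000007),
   ((X.2.1 * Y.1.1 + X.2.2 * Y.2.1) % 1000000007, (X.2.1 * Y.1.2 + X.2.2 * Y.2.2) % 1000000007))

def pvMpow (X : (Int × Int) × (Int × Int)) (e : Nat) : (Int × Int) × (Int × Int) :=
  if h : e = 0 then ((1, 0), (0, 1))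
  else
    let H := pvMpow (pvMul X X) (e / 2)
    if e % 2 = 1 then pvMul X H else H
termination_by e
decreasing_by exact Nat.div_lt_self (Nat.pos_of_ne_zero h) one_lt_two

def solve_alt (A : Int) : Int :=
  let e : Int := if A > 1 then A - 1 else 0
  let M := pvMpow ((11, 10), (5, 7)) e.toNat
  let c3 := (M.1.1 * 24 + M.1.2 * 12) % 1000000007
  let c2 := (M.2.1 * 24 + M.2.2 * 12) % 1000000007
  (c3 + c2) % 1000000007

-- ===== PRECONDITION & SPEC =====
def Spec_solve (A : Int) (out : Int) : Prop := out = solve_alt A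
instance (A : Int) (out : Int) : Decidable (Spec_solve A out) := by unfold Spec_solve; infer_instance

-- ===== CLAIM (what is proved, stated in full; the proofs are below) =====
def Claim_equal_solve : Prop := ∀ (A : Int), Dom_solve A → Spec_solve A (solve A)

-- ===== LEMMAS AND PROOFS =====

-- A's loop body as a step function
def pvStep (s : Int × Int) : Int × Int :=
  ((11 * s.1 + 10 * s.2) % 1000000007, (5 * s.1 + 7 * s.2) % 1000000007)

-- B's action of a matrix on a column vector (mod p), as used in solve_alt
def pvApp (X : (Int × Int) × (Int × Int)) (v : Int × Int) : Int × Int :=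
  ((X.1.1 * v.1 + X.1.2 * v.2) % 1000000007, (X.2.1 * v.1 + X.2.2 * v.2) % 1000000007)

lemma pv_mod_lin (a b x y : Int) :
    (a * (x % 1000000007) + b * (y % 1000000007)) % 1000000007 = (a * x + b * y) % 1000000007 := by
  have hx : x % 1000000007 ≡ x [ZMOD 1000000007] := Int.emod_emod_of_dvd x dvd_rfl
  have hy : y % 1000000007 ≡ y [ZMOD 1000000007] := Int.emod_emod_of_dvd y dvd_rfl
  exact (hx.mul_left a).add (hy.mul_left b)

lemma pv_mod_lin' (a b x y : Int) :
    ((a % 1000000007) * x + (b % 1000000007) * y) % 1000000007 = (a * x + b * y) % 1000000007 := by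
  have ha : a % 1000000007 ≡ a [ZMOD 1000000007] := Int.emod_emod_of_dvd a dvd_rfl
  have hb : b % 1000000007 ≡ b [ZMOD 1000000007] := Int.emod_emod_of_dvd b dvd_rfl
  exact (ha.mul_right x).add (hb.mul_right y)

lemma pvApp_mul (X Y : (Int × Int) × (Int × Int)) (v : Int × Int) :
    pvApp (pvMul X Y) v = pvApp X (pvApp Y v) := by
  simp only [pvApp, pvMul, Prod.mk.injEq]
  refine ⟨?_, ?_⟩ <;> (rw [pv_mod_lin, pv_mod_lin']; congr 1; ring)

lemma pvApp_mul_fun (X : (Int × Int) × (Int × Int)) :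
    pvApp (pvMul X X) = pvApp X ∘ pvApp X := funext fun v => pvApp_mul X X v

lemma pvMpow_app (e : Nat) : ∀ (X : (Int × Int) × (Int × Int)) (v : Int × Int),
    pvApp (pvMpow X e) v = (pvApp X)^[e] (v.1 % 1000000007, v.2 % 1000000007) := by
  induction e using Nat.strong_induction_on with
  | _ e ih =>
    intro X v
    rw [pvMpow]
    by_cases h0 : e = 0
    · subst h0
      simp [pvApp, Function.iterate_zero]
    · have hlt : e / 2 < e := Nat.div_lt_self (Nat.pos_of_ne_zero h0) one_lt_two
      have ihk := ih (e / 2) hlt (pvMul X X) v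
      have htwo : (pvApp (pvMul X X))^[e / 2] = (pvApp X)^[2 * (e / 2)] := by
        rw [pvApp_mul_fun, Function.iterate_mul]
        congr 1
      simp only [h0, dite_false]
      by_cases hpar : e % 2 = 1
      · have hstep := Function.iterate_succ_apply' (pvApp X) (2 * (e / 2))
          ((v.1 % 1000000007, v.2 % 1000000007))
        simp only [hpar, if_pos]
        rw [pvApp_mul, ihk, htwo, ← hstep, show (2 * (e / 2)).succ = e from by omega]
      · simp only [hpar, if_false]
        rw [ihk, htwo, show 2 * (e / 2) = e from by omega]

lemma pvApp_base (v : Int × Int) : pvApp ((11, 10), (5, 7)) v = pvStep v := rfl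

lemma pv_foldl_step (l : List Int) (init : Int × Int) :
    l.foldl (fun (s : Int × Int) (_ : Int) =>
      let t := s.1
      ((11 * s.1 + 10 * s.2) % 1000000007, (5 * t + 7 * s.2) % 1000000007)) init
    = pvStep^[l.length] init := by
  induction l generalizing init with
  | nil => rfl
  | cons a l ih =>
    simp only [List.foldl_cons, List.length_cons, Function.iterate_succ_apply]
    exact ih _

-- ===== VERDICT (by name: the statement is the Claim_ definition above) =====
theorem solve_spec : Claim_equal_solve := by
  intro A _
  show solve A = solve_alt A
  have key : pvApp (pvMpow ((11, 10), (5, 7)) (A - 1).toNat) (24, 12)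
      = pvStep^[(A - 1).toNat] ((24 : Int), (12 : Int)) := by
    rw [pvMpow_app, show pvApp ((11, 10), (5, 7)) = pvStep from funext pvApp_base]
    norm_num
  have hlen : (PySem.List.pyRange 2 (A + 1) 1).length = (A - 1).toNat := by
    rw [PySem.List.length_pyRange_one]
    congr 1
    omega
  have he : (if A > 1 then A - 1 else 0 : Int).toNat = (A - 1).toNat := by
    split_ifs with h <;> omega
  have h1 := congrArg Prod.fst key
  have h2 := congrArg Prod.snd key
  simp only [pvApp] at h1 h2
  simp only [solve, solve_alt, pv_foldl_step, hlen, he, h1, h2]
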